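-- pv_equiv track=rewrite | github.com/yunusemreakcicekk/mini-soc-trainer | training_lab/upgrade_data_debug.py | to_tr
-- ===== SOURCE A (Python) =====
-- def to_tr(text):
--     mappings = {
--         "SSH Brute Force": "SSH Kaba Kuvvet Saldırı",
--         "HIGH": "YÜKSEK",
--         "MEDIUM": "ORTA",
--         "LOW": "DÜŞÜK",
--         "TRUE_POSITIVE": "GERÇEK POZİTİF",
--         "FALSE_POSITIVE": "YANLIŞ POZİTİF"
--     }
--     for k, v in mappings.items():
--         text = text.replace(k, v)
--     return text + " [TR]"
-- ===== SOURCE B (Python) =====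
-- def to_tr(text):
--     rules = (
--         ("SSH Brute Force", "SSH Kaba Kuvvet Saldırı"),
--         ("HIGH", "YÜKSEK"),
--         ("MEDIUM", "ORTA"),
--         ("LOW", "DÜŞÜK"),
--         ("TRUE_POSITIVE", "GERÇEK POZİTİF"),
--         ("FALSE_POSITIVE", "YANLIŞ POZİTİF"),
--     )
--     out = []
--     i = 0
--     n = len(text)
--     while i < n:
--         for k, v in rules:
--             if text.startswith(k, i):
--                 out.append(v)
--                 i += len(k)
--                 break
--         else:
--             out.append(text[i])
--             i += 1
--     return "".join(out) + " [TR]"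
-- ===== Notes on version B (the rewrite author's own statement) =====
-- stated objective: alternative
-- what changed: B replaces the six sequential full-string replace() passes by one left-to-right scan that matches all six keywords simultaneously and emits the translation (or the character) as it goes, so replacement output is never rescanned.
-- intended difference: On texts containing the substring 'TRUE_POSITIVEALSE_POSITIVE', A's fifth pass leaves a value ending in 'F' adjacent to 'ALSE_POSITIVE' and the sixth pass re-translates that accidental 'FALSE_POSITIVE' (e.g. A gives 'GERÇEK POZİTİYANLIŞ POZİTİF [TR]'), while B translates only keywords present in the original text ('GERÇEK POZİTİFALSE_POSITIVE [TR]'), which is the intended behaviour of a keyword translator. — e.g. on to_tr("TRUE_POSITIVEALSE_POSITIVE"): A returns "GERÇEK POZİTİYANLIŞ POZİTİF [TR]", B returns "GERÇEK POZİTİFALSE_POSITIVE [TR]"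
import Mathlib
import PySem

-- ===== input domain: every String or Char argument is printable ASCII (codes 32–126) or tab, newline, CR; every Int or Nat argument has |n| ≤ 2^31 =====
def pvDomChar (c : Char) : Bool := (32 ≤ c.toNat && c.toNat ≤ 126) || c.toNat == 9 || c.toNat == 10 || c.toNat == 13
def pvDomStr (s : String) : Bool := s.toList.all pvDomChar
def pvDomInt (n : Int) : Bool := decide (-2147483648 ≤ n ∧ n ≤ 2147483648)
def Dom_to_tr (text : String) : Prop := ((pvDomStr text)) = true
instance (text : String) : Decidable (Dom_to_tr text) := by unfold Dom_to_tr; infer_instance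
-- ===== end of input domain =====

set_option maxHeartbeats 1600000


-- B replaces A's six sequential str.replace passes by a single left-to-right scan matching all
-- six keywords simultaneously (alternative decomposition, same cost); return value only.

-- ===== PORT A =====
def pvMappings : List (String × String) :=
  [("SSH Brute Force", "SSH Kaba Kuvvet Saldırı"),
   ("HIGH", "YÜKSEK"),
   ("MEDIUM", "ORTA"),
   ("LOW", "DÜŞÜK"),
   ("TRUE_POSITIVE", "GERÇEK POZİTİF"),
   ("FALSE_POSITIVE", "YANLIŞ POZİTİF")]

def to_tr (text : String) : String :=
  (pvMappings.foldl (fun t kv => PySem.Str.replace t kv.1 kv.2) text) ++ " [TR]"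

-- ===== PORT B =====
-- Source B's own mapping dict, over lists of code points, as Source B scans the text
def pvPairsC : List (List Char × List Char) :=
  [("SSH Brute Force".toList, "SSH Kaba Kuvvet Saldırı".toList),
   ("HIGH".toList, "YÜKSEK".toList),
   ("MEDIUM".toList, "ORTA".toList),
   ("LOW".toList, "DÜŞÜK".toList),
   ("TRUE_POSITIVE".toList, "GERÇEK POZİTİF".toList),
   ("FALSE_POSITIVE".toList, "YANLIŞ POZİTİF".toList)]

-- Source B's while loop (i counts up to n; here the remaining suffix shrinks, fuel = its length):
-- at each position try the keys in order (for/else with startswith); on a hit emit the value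
-- and jump past the key, otherwise emit the character.
def scanGo (ps : List (List Char × List Char)) : Nat → List Char → List Char
  | 0, _ => []
  | _ + 1, [] => []
  | fuel + 1, c :: s =>
    match ps.find? (fun kv => kv.1.isPrefixOf (c :: s)) with
    | some kv => kv.2 ++ scanGo ps fuel (List.drop (kv.1.length - 1) s)
    | none => c :: scanGo ps fuel s

def scanTr (ps : List (List Char × List Char)) (l : List Char) : List Char :=
  scanGo ps l.length l

def to_tr_alt (text : String) : String :=
  String.ofList (scanTr pvPairsC text.toList ++ " [TR]".toList)

-- ===== PRECONDITION & SPEC =====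
-- On texts containing "TRUE_POSITIVEALSE_POSITIVE", A's fifth pass leaves a value ending in 'F'
-- adjacent to "ALSE_POSITIVE" and the sixth pass re-translates that accidental "FALSE_POSITIVE";
-- B translates only keywords of the original text, the intended behaviour of a keyword translator.
def pvMagicL : List Char := "TRUE_POSITIVEALSE_POSITIVE".toList
def pvHasMagic : List Char → Bool
  | [] => false
  | c :: s => pvMagicL.isPrefixOf (c :: s) || pvHasMagic s
def D_to_tr (text : String) : Prop := pvHasMagic text.toList = true
instance (text : String) : Decidable (D_to_tr text) := by unfold D_to_tr; infer_instance

def Spec_to_tr (text : String) (out : String) : Prop := ¬ D_to_tr text → out = to_tr_alt text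
instance (text : String) (out : String) : Decidable (Spec_to_tr text out) := by unfold Spec_to_tr; infer_instance

def pvDiffWitness_to_tr : String := "TRUE_POSITIVEALSE_POSITIVE"
def pvDiffWitnessOut_to_tr : String × String :=
  ("GERÇEK POZİTİYANLIŞ POZİTİF [TR]", "GERÇEK POZİTİFALSE_POSITIVE [TR]")

-- ===== CLAIM (what is proved, stated in full; the proofs are below) =====
def Claim_unchanged_to_tr : Prop := ∀ (text : String), Dom_to_tr text → Spec_to_tr text (to_tr text)
def Claim_changed_to_tr : Prop := Dom_to_tr (pvDiffWitness_to_tr) ∧ D_to_tr (pvDiffWitness_to_tr) ∧ to_tr (pvDiffWitness_to_tr) = pvDiffWitnessOut_to_tr.1 ∧ to_tr_alt (pvDiffWitness_to_tr) = pvDiffWitnessOut_to_tr.2 ∧ pvDiffWitnessOut_to_tr.1 ≠ pvDiffWitnessOut_to_tr.2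
def Claim_exact_to_tr : Prop := ∀ (text : String), Dom_to_tr text → D_to_tr text → to_tr text ≠ to_tr_alt text

-- ===== LEMMAS AND PROOFS =====

-- ---------- generic prefix toolbox ----------
theorem len_pos {l : List Char} (h : l ≠ []) : 1 ≤ l.length := by
  cases hl : l with
  | nil => exact absurd hl h
  | cons a t => simp

theorem prefix_append_left {k b x : List Char} (h : k <+: b ++ x) (hl : k.length ≤ b.length) :
    k <+: b := by
  have h1 : k = (b ++ x).take k.length := List.prefix_iff_eq_take.mp h
  rw [List.take_append_of_le_length hl] at h1
  exact h1 ▸ List.take_prefix _ _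

theorem prefix_append_right {k b x : List Char} (h : k <+: b ++ x) (hl : b.length ≤ k.length) :
    b <+: k := by
  obtain ⟨r, hr⟩ := h
  have h1 : (k ++ r).take b.length = b.take b.length := by
    rw [hr, List.take_append_of_le_length le_rfl]
  have h2 : (k ++ r).take b.length = k.take b.length := List.take_append_of_le_length hl
  have h3 : k.take b.length = b := by rw [← h2, h1, List.take_length]
  exact h3 ▸ List.take_prefix _ _

theorem nocross {k a : List Char}
    (h : ∀ p, p < a.length → ¬ (a.drop p <+: k) ∧ ¬ (k <+: a.drop p)) :
    ∀ x p, p < a.length → ¬ k <+: (a.drop p ++ x) := by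
  intro x p hp hk
  by_cases hle : k.length ≤ (a.drop p).length
  · exact (h p hp).2 (prefix_append_left hk hle)
  · exact (h p hp).1 (prefix_append_right hk (by omega))

-- ---------- str.replace characterisation ----------
def repl (old new : List Char) : List Char → List Char
  | [] => []
  | c :: t =>
    if old.isPrefixOf (c :: t) then new ++ repl old new (List.drop (old.length - 1) t)
    else c :: repl old new t
termination_by l => l.length
decreasing_by
  · simp only [List.length_drop, List.length_cons]; omega
  · simp only [List.length_cons]; omega

theorem repl_nil (old new : List Char) : repl old new [] = [] := by
  simp [repl]

theorem repl_pos {old : List Char} (new : List Char) {l : List Char}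
    (hold : old ≠ []) (h : old <+: l) :
    repl old new l = new ++ repl old new (l.drop old.length) := by
  cases l with
  | nil => cases hold (List.prefix_nil.mp h)
  | cons c t =>
    rw [repl]
    rw [if_pos (List.isPrefixOf_iff_prefix.mpr h)]
    cases old with
    | nil => cases hold rfl
    | cons o os => simp

theorem repl_neg {old : List Char} (new : List Char) {c : Char} {t : List Char}
    (h : ¬ old <+: (c :: t)) :
    repl old new (c :: t) = c :: repl old new t := by
  rw [repl, if_neg (by simpa [List.isPrefixOf_iff_prefix] using h)]

theorem replace_go_eq (old new : List Char) (hold : old ≠ []) :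
    ∀ fuel l acc, l.length ≤ fuel →
      PySem.Chars.replace.go old new fuel l acc = acc.reverse ++ repl old new l := by
  intro fuel
  induction fuel with
  | zero =>
    intro l acc hl
    have : l = [] := by cases l <;> simp_all
    subst this
    rw [PySem.Chars.replace.go]
    simp [repl_nil]
  | succ n ih =>
    intro l acc hl
    cases l with
    | nil =>
      rw [PySem.Chars.replace.go]
      simp [repl_nil]
      omega
    | cons c t =>
      rw [PySem.Chars.replace.go]
      by_cases h : old.isPrefixOf (c :: t)
      · rw [if_pos h]
        have hpre : old <+: (c :: t) := List.isPrefixOf_iff_prefix.mp h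
        have hol : 1 ≤ old.length := len_pos hold
        rw [ih _ _ (by simp at hl ⊢; omega)]
        rw [repl_pos new hold hpre]
        simp
      · rw [if_neg h]
        rw [ih _ _ (by simp at hl ⊢; omega)]
        rw [repl_neg new (by simpa [List.isPrefixOf_iff_prefix] using h)]
        simp

theorem replace_eq_repl (s old new : List Char) (hold : old ≠ []) :
    PySem.Chars.replace s old new = repl old new s := by
  rw [PySem.Chars.replace]
  rw [if_neg (by simpa [List.isEmpty_iff] using hold)]
  simpa using replace_go_eq old new hold s.length s [] le_rfl

-- repl distributes over an append when no needle occurrence crosses or sits in the left part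
theorem repl_append (old new a x : List Char)
    (H : ∀ p, p < a.length → ¬ old <+: (a.drop p ++ x)) :
    repl old new (a ++ x) = a ++ repl old new x := by
  induction a with
  | nil => simp
  | cons c a' ih =>
    have h0 : ¬ old <+: (c :: (a' ++ x)) := by simpa using H 0 (by simp)
    rw [List.cons_append, repl_neg new h0, ih (fun p hp => by simpa using H (p + 1) (by simp; omega))]
    simp

-- ---------- scanner equations ----------
theorem scanGo_irrel (ps : List (List Char × List Char))
    (hne : ∀ kv ∈ ps, kv.1 ≠ []) :
    ∀ fuel fuel' l, l.length ≤ fuel → l.length ≤ fuel' →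
      scanGo ps fuel l = scanGo ps fuel' l := by
  intro fuel
  induction fuel with
  | zero =>
    intro fuel' l hl _
    have : l = [] := by cases l <;> simp_all
    subst this; cases fuel' <;> rfl
  | succ n ih =>
    intro fuel' l hl hl'
    cases l with
    | nil => cases fuel' <;> rfl
    | cons c s =>
      cases fuel' with
      | zero => simp at hl'
      | succ m =>
        rw [scanGo, scanGo]
        cases hf : ps.find? (fun kv => kv.1.isPrefixOf (c :: s)) with
        | none => rw [ih m s (by simp at hl; omega) (by simp at hl'; omega)]
        | some kv =>
          have hkv : kv ∈ ps := List.mem_of_find?_eq_some hf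
          have hlen : 1 ≤ kv.1.length := len_pos (hne kv hkv)
          have heq := ih m (List.drop (kv.1.length - 1) s)
            (by simp at hl ⊢; omega) (by simp at hl' ⊢; omega)
          simp only [heq]

theorem scan_nil (ps : List (List Char × List Char)) : scanTr ps [] = [] := rfl

theorem scan_cons (ps : List (List Char × List Char))
    (hne : ∀ kv ∈ ps, kv.1 ≠ []) (c : Char) (s : List Char) :
    scanTr ps (c :: s) =
      match ps.find? (fun kv => kv.1.isPrefixOf (c :: s)) with
      | some kv => kv.2 ++ scanTr ps (List.drop (kv.1.length - 1) s)
      | none => c :: scanTr ps s := by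
  rw [show scanTr ps (c :: s) = scanGo ps (s.length + 1) (c :: s) from rfl, scanGo]
  cases hf : ps.find? (fun kv => kv.1.isPrefixOf (c :: s)) with
  | none => rfl
  | some kv =>
    have heq := scanGo_irrel ps hne s.length (List.drop (kv.1.length - 1) s).length
      (List.drop (kv.1.length - 1) s) (by simp) le_rfl
    simp only [scanTr]
    simp only [heq]

theorem scan_none (ps : List (List Char × List Char)) (c : Char) (s : List Char)
    (hf : ps.find? (fun kv => kv.1.isPrefixOf (c :: s)) = none) :
    scanTr ps (c :: s) = c :: scanTr ps s := by
  rw [show scanTr ps (c :: s) = scanGo ps (s.length + 1) (c :: s) from rfl, scanGo, hf]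
  rfl

theorem scan_some (ps : List (List Char × List Char))
    (hne : ∀ kv ∈ ps, kv.1 ≠ []) (c : Char) (s : List Char) (kv : List Char × List Char)
    (hf : ps.find? (fun kv => kv.1.isPrefixOf (c :: s)) = some kv) :
    scanTr ps (c :: s) = kv.2 ++ scanTr ps (List.drop (kv.1.length - 1) s) := by
  rw [scan_cons ps hne c s, hf]

-- the scanner distributes over an append when no key matches in or across the left part
theorem scan_append (ps : List (List Char × List Char))
    (hne : ∀ kv ∈ ps, kv.1 ≠ []) (a x : List Char)
    (H : ∀ p, p < a.length → ∀ kv ∈ ps, ¬ kv.1 <+: (a.drop p ++ x)) :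
    scanTr ps (a ++ x) = a ++ scanTr ps x := by
  induction a with
  | nil => simp
  | cons c a' ih =>
    have hf : ps.find? (fun kv => kv.1.isPrefixOf (c :: (a' ++ x))) = none := by
      rw [List.find?_eq_none]
      intro kv hkv
      simp only [List.isPrefixOf_iff_prefix]
      simpa using H 0 (by simp) kv hkv
    rw [List.cons_append, scan_none ps c _ hf,
      ih (fun p hp kv hkv => by simpa using H (p + 1) (by simp; omega) kv hkv)]
    simp

-- if a pattern never 2-fits any value, a prefix of it coming out of the scanner came in
theorem scan_preserve (ps : List (List Char × List Char)) (pat : List Char)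
    (Hfin : ∀ m, m < pat.length → ∀ kv ∈ ps, ¬ (pat.drop m <+: kv.2) ∧ ¬ (kv.2 <+: pat.drop m)) :
    ∀ t m, m < pat.length → pat.drop m <+: scanTr ps t → pat.drop m <+: t := by
  intro t
  induction t with
  | nil => intro m hm h; simpa [scan_nil] using h
  | cons c s ih =>
    intro m hm h
    cases hf : ps.find? (fun kv => kv.1.isPrefixOf (c :: s)) with
    | some kv =>
      exfalso
      have hmem : kv ∈ ps := List.mem_of_find?_eq_some hf
      have hsc : ∃ X, scanTr ps (c :: s) = kv.2 ++ X := by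
        rw [show scanTr ps (c :: s) = scanGo ps (s.length + 1) (c :: s) from rfl, scanGo, hf]
        exact ⟨_, rfl⟩
      obtain ⟨X, hsc⟩ := hsc
      rw [hsc] at h
      by_cases hle : (pat.drop m).length ≤ kv.2.length
      · exact (Hfin m hm kv hmem).1 (prefix_append_left h hle)
      · exact (Hfin m hm kv hmem).2 (prefix_append_right h (by omega))
    | none =>
      rw [scan_none ps c s hf] at h
      have hdrop : pat.drop m = pat[m] :: pat.drop (m + 1) :=
        List.drop_eq_getElem_cons hm
      rw [hdrop] at h ⊢
      rw [List.cons_prefix_cons] at h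
      obtain ⟨hc, htail⟩ := h
      subst hc
      by_cases hlt : m + 1 < pat.length
      · exact List.cons_prefix_cons.mpr ⟨rfl, ih (m + 1) hlt htail⟩
      · have : pat.drop (m + 1) = [] := List.drop_eq_nil_of_le (by omega)
        rw [this]
        exact List.cons_prefix_cons.mpr ⟨rfl, List.nil_prefix⟩

-- ---------- one sequential pass absorbed into the scanner ----------
theorem stage (ps : List (List Char × List Char)) (k v : List Char)
    (P : List Char → Prop)
    (HP : ∀ t n, P t → P (t.drop n))
    (Hk : 2 ≤ k.length)
    (Hne : ∀ kv ∈ ps, kv.1 ≠ [])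
    (H3 : ∀ kv ∈ ps, ∀ t', P (kv.1 ++ t') →
      repl k v (kv.2 ++ scanTr ps t') = kv.2 ++ repl k v (scanTr ps t'))
    (H4 : ∀ kv ∈ ps, ∀ p, p < k.length → ¬ (k.drop p <+: kv.1) ∧ ¬ (kv.1 <+: k.drop p))
    (H5 : ∀ m, m < k.tail.length → ∀ kv ∈ ps,
      ¬ (k.tail.drop m <+: kv.2) ∧ ¬ (kv.2 <+: k.tail.drop m)) :
    ∀ t, P t → repl k v (scanTr ps t) = scanTr (ps ++ [(k, v)]) t := by
  have hne' : ∀ kv ∈ ps ++ [(k, v)], kv.1 ≠ [] := by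
    intro kv hkv
    rcases List.mem_append.mp hkv with h | h
    · exact Hne kv h
    · simp at h
      subst h
      intro hke
      have : k.length = 0 := by simpa using congrArg List.length hke
      omega
  have main : ∀ n t, t.length ≤ n → P t → repl k v (scanTr ps t) = scanTr (ps ++ [(k, v)]) t := by
    intro n
    induction n with
    | zero =>
      intro t ht _
      have : t = [] := by cases t <;> simp_all
      subst this; simp [scan_nil, repl_nil]
    | succ n ih =>
      intro t ht hP
      cases t with
      | nil => simp [scan_nil, repl_nil]
      | cons c s =>
        cases hf : ps.find? (fun kv => kv.1.isPrefixOf (c :: s)) with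
        | some kv =>
          have hmem : kv ∈ ps := List.mem_of_find?_eq_some hf
          have hpre : kv.1 <+: (c :: s) := by
            have := List.find?_some hf
            simpa [List.isPrefixOf_iff_prefix] using this
          have hk1 : kv.1 ≠ [] := Hne kv hmem
          have hk1l : 1 ≤ kv.1.length := by
            cases h : kv.1 with
            | nil => exact absurd h hk1
            | cons o os => simp
          have hdropeq : List.drop (kv.1.length - 1) s = (c :: s).drop kv.1.length := by
            cases h : kv.1 with
            | nil => exact absurd h hk1
            | cons o os => simp [h]
          have hdec : c :: s = kv.1 ++ (c :: s).drop kv.1.length := by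
            obtain ⟨r, hr⟩ := hpre
            rw [← hr, List.drop_left]
          have hP' : P ((c :: s).drop kv.1.length) := HP _ _ hP
          rw [scan_some ps Hne c s kv hf, hdropeq]
          rw [H3 kv hmem _ (by rw [← hdec]; exact hP)]
          rw [ih _ (by simp at ht ⊢; omega) hP']
          rw [scan_some (ps ++ [(k, v)]) hne' c s kv (by
            rw [List.find?_append, hf]; rfl), hdropeq]
        | none =>
          by_cases hk : k <+: (c :: s)
          · -- the new key matches at the head
            have hdec : c :: s = k ++ (c :: s).drop k.length := by
              obtain ⟨r, hr⟩ := hk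
              rw [← hr, List.drop_left]
            have hsplit : scanTr ps (c :: s) = k ++ scanTr ps ((c :: s).drop k.length) := by
              conv_lhs => rw [hdec]
              exact scan_append ps Hne k _ (fun p hp kv hkv =>
                nocross (fun q hq => (H4 kv hkv q hq |>.imp id id)) _ p hp)
            rw [hsplit]
            rw [repl_pos v (by intro h; rw [h] at Hk; simp at Hk) (List.prefix_append k _),
              List.drop_left]
            have hP' : P ((c :: s).drop k.length) := HP _ _ hP
            rw [ih _ (by
              have : (c :: s).length = s.length + 1 := by simp
              simp only [List.length_drop, this] at *
              omega) hP']
            have hf' : (ps ++ [(k, v)]).find? (fun kv => kv.1.isPrefixOf (c :: s)) = some (k, v) := by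
              rw [List.find?_append, hf]
              simp [List.isPrefixOf_iff_prefix, hk]
            rw [scan_some (ps ++ [(k, v)]) hne' c s (k, v) hf']
            have : List.drop (k.length - 1) s = (c :: s).drop k.length := by
              cases h : k with
              | nil => rw [h] at Hk; simp at Hk
              | cons o os => simp [h]
            rw [this]
          · -- no key at all matches at the head
            have hnk : ¬ k <+: (c :: scanTr ps s) := by
              intro habs
              cases hkk : k with
              | nil => rw [hkk] at Hk; simp at Hk
              | cons kh kt =>
                rw [hkk, List.cons_prefix_cons] at habs
                obtain ⟨hch, htail⟩ := habs
                have hkt : 0 < kt.length := by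
                  have := Hk; rw [hkk] at this; simp at this; omega
                have := scan_preserve ps kt
                  (by intro m hm kv hkv; have := H5 m (by rw [hkk]; simpa using hm) kv hkv
                      rw [hkk] at this; simpa using this) s 0 hkt (by simpa using htail)
                apply hk
                rw [hkk, ← hch, List.cons_prefix_cons]
                exact ⟨rfl, by simpa using this⟩
            rw [scan_none ps c s hf, repl_neg v hnk]
            rw [ih _ (by simp at ht ⊢; omega) (by
              have := HP (c :: s) 1 hP; simpa using this)]
            have hf' : (ps ++ [(k, v)]).find? (fun kv => kv.1.isPrefixOf (c :: s)) = none := by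
              rw [List.find?_append, hf]
              simp [List.isPrefixOf_iff_prefix, hk]
            rw [scan_none (ps ++ [(k, v)]) c s hf']
  intro t hP
  exact main t.length t le_rfl hP

-- ---------- the six concrete stages ----------
def pvPs1 : List (List Char × List Char) :=
  [("SSH Brute Force".toList, "SSH Kaba Kuvvet Saldırı".toList)]
def pvPs2 : List (List Char × List Char) := pvPs1 ++ [("HIGH".toList, "YÜKSEK".toList)]
def pvPs3 : List (List Char × List Char) := pvPs2 ++ [("MEDIUM".toList, "ORTA".toList)]
def pvPs4 : List (List Char × List Char) := pvPs3 ++ [("LOW".toList, "DÜŞÜK".toList)]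
def pvPs5 : List (List Char × List Char) := pvPs4 ++ [("TRUE_POSITIVE".toList, "GERÇEK POZİTİF".toList)]
def pvPs6 : List (List Char × List Char) := pvPs5 ++ [("FALSE_POSITIVE".toList, "YANLIŞ POZİTİF".toList)]

theorem scan_empty (t : List Char) : scanTr [] t = t := by
  induction t with
  | nil => rfl
  | cons c s ih => rw [scan_none [] c s rfl, ih]

theorem H3_of_nocross {k v vi : List Char}
    (h : ∀ p, p < vi.length → ¬ (vi.drop p <+: k) ∧ ¬ (k <+: vi.drop p)) :
    ∀ X, repl k v (vi ++ X) = vi ++ repl k v X :=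
  fun X => repl_append k v vi X (nocross h X)

theorem stageT (ps : List (List Char × List Char)) (k v : List Char)
    (Hk : 2 ≤ k.length)
    (Hne : ∀ kv ∈ ps, kv.1 ≠ [])
    (H3 : ∀ kv ∈ ps, ∀ t', repl k v (kv.2 ++ scanTr ps t') = kv.2 ++ repl k v (scanTr ps t'))
    (H4 : ∀ kv ∈ ps, ∀ p, p < k.length → ¬ (k.drop p <+: kv.1) ∧ ¬ (kv.1 <+: k.drop p))
    (H5 : ∀ m, m < k.tail.length → ∀ kv ∈ ps,
      ¬ (k.tail.drop m <+: kv.2) ∧ ¬ (kv.2 <+: k.tail.drop m)) :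
    ∀ t, repl k v (scanTr ps t) = scanTr (ps ++ [(k, v)]) t :=
  fun t => stage ps k v (fun _ => True) (fun _ _ _ => trivial) Hk Hne
    (fun kv hkv t' _ => H3 kv hkv t') H4 H5 t trivial

theorem st1 (t : List Char) :
    repl "SSH Brute Force".toList "SSH Kaba Kuvvet Saldırı".toList t = scanTr pvPs1 t := by
  have h := stageT [] "SSH Brute Force".toList "SSH Kaba Kuvvet Saldırı".toList
    (by decide) (by simp) (by simp) (by simp) (by simp) t
  rw [scan_empty] at h
  simpa [pvPs1] using h

theorem st2 (t : List Char) :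
    repl "HIGH".toList "YÜKSEK".toList (scanTr pvPs1 t) = scanTr pvPs2 t := by
  have hH3 : ∀ kv ∈ pvPs1, ∀ t',
      repl "HIGH".toList "YÜKSEK".toList (kv.2 ++ scanTr pvPs1 t') =
        kv.2 ++ repl "HIGH".toList "YÜKSEK".toList (scanTr pvPs1 t') := by
    intro kv hkv t'
    fin_cases hkv
    · exact H3_of_nocross (by decide) _
  have h := stageT pvPs1 "HIGH".toList "YÜKSEK".toList
    (by decide) (by decide) hH3 (by decide) (by decide) t
  simpa [pvPs2] using h

theorem st3 (t : List Char) :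
    repl "MEDIUM".toList "ORTA".toList (scanTr pvPs2 t) = scanTr pvPs3 t := by
  have hH3 : ∀ kv ∈ pvPs2, ∀ t',
      repl "MEDIUM".toList "ORTA".toList (kv.2 ++ scanTr pvPs2 t') =
        kv.2 ++ repl "MEDIUM".toList "ORTA".toList (scanTr pvPs2 t') := by
    intro kv hkv t'
    fin_cases hkv
    · exact H3_of_nocross (by decide) _
    · exact H3_of_nocross (by decide) _
  have h := stageT pvPs2 "MEDIUM".toList "ORTA".toList
    (by decide) (by decide) hH3 (by decide) (by decide) t
  simpa [pvPs3] using h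

theorem st4 (t : List Char) :
    repl "LOW".toList "DÜŞÜK".toList (scanTr pvPs3 t) = scanTr pvPs4 t := by
  have hH3 : ∀ kv ∈ pvPs3, ∀ t',
      repl "LOW".toList "DÜŞÜK".toList (kv.2 ++ scanTr pvPs3 t') =
        kv.2 ++ repl "LOW".toList "DÜŞÜK".toList (scanTr pvPs3 t') := by
    intro kv hkv t'
    fin_cases hkv
    · exact H3_of_nocross (by decide) _
    · exact H3_of_nocross (by decide) _
    · exact H3_of_nocross (by decide) _
  have h := stageT pvPs3 "LOW".toList "DÜŞÜK".toList
    (by decide) (by decide) hH3 (by decide) (by decide) t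
  simpa [pvPs4] using h

theorem st5 (t : List Char) :
    repl "TRUE_POSITIVE".toList "GERÇEK POZİTİF".toList (scanTr pvPs4 t) = scanTr pvPs5 t := by
  have hH3 : ∀ kv ∈ pvPs4, ∀ t',
      repl "TRUE_POSITIVE".toList "GERÇEK POZİTİF".toList (kv.2 ++ scanTr pvPs4 t') =
        kv.2 ++ repl "TRUE_POSITIVE".toList "GERÇEK POZİTİF".toList (scanTr pvPs4 t') := by
    intro kv hkv t'
    fin_cases hkv
    · exact H3_of_nocross (by decide) _
    · exact H3_of_nocross (by decide) _
    · exact H3_of_nocross (by decide) _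
    · exact H3_of_nocross (by decide) _
  have h := stageT pvPs4 "TRUE_POSITIVE".toList "GERÇEK POZİTİF".toList
    (by decide) (by decide) hH3 (by decide) (by decide) t
  simpa [pvPs5] using h

-- the sixth pass: sound only away from the cascade region
theorem st6 (t : List Char) (hn : ¬ "TRUE_POSITIVEALSE_POSITIVE".toList <:+: t) :
    repl "FALSE_POSITIVE".toList "YANLIŞ POZİTİF".toList (scanTr pvPs5 t) = scanTr pvPs6 t := by
  have hH3 : ∀ kv ∈ pvPs5, ∀ t',
      (¬ "TRUE_POSITIVEALSE_POSITIVE".toList <:+: (kv.1 ++ t')) →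
      repl "FALSE_POSITIVE".toList "YANLIŞ POZİTİF".toList (kv.2 ++ scanTr pvPs5 t') =
        kv.2 ++ repl "FALSE_POSITIVE".toList "YANLIŞ POZİTİF".toList (scanTr pvPs5 t') := by
    intro kv hkv t' hP
    fin_cases hkv
    · exact H3_of_nocross (by decide) _
    · exact H3_of_nocross (by decide) _
    · exact H3_of_nocross (by decide) _
    · exact H3_of_nocross (by decide) _
    · -- the cascading pair: value "GERÇEK POZİTİF" ends in 'F'
      apply repl_append
      intro p hp hpre
      by_cases h13 : p = 13
      · subst h13
        rw [show ("GERÇEK POZİTİF".toList).drop 13 = ['F'] from by decide] at hpre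
        rw [show "FALSE_POSITIVE".toList = 'F' :: "ALSE_POSITIVE".toList from by decide,
          List.singleton_append, List.cons_prefix_cons] at hpre
        have hpat : "ALSE_POSITIVE".toList <+: t' := by
          have := scan_preserve pvPs5 "ALSE_POSITIVE".toList (by decide) t' 0 (by decide)
            (by simpa using hpre.2)
          simpa using this
        apply hP
        obtain ⟨r, hr⟩ := hpat
        have hpre2 : "TRUE_POSITIVEALSE_POSITIVE".toList <+: "TRUE_POSITIVE".toList ++ t' := by
          refine ⟨r, ?_⟩
          rw [show ("TRUE_POSITIVEALSE_POSITIVE".toList : List Char) =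
            "TRUE_POSITIVE".toList ++ "ALSE_POSITIVE".toList from by decide]
          rw [List.append_assoc, hr]
        exact hpre2.isInfix
      · have hp14 : p < 14 := by simpa using hp
        have hfin : ¬ (("GERÇEK POZİTİF".toList).drop p <+: "FALSE_POSITIVE".toList) ∧
            ¬ ("FALSE_POSITIVE".toList <+: ("GERÇEK POZİTİF".toList).drop p) := by
          have hall : ∀ q, q < 14 → q ≠ 13 →
              ¬ (("GERÇEK POZİTİF".toList).drop q <+: "FALSE_POSITIVE".toList) ∧
              ¬ ("FALSE_POSITIVE".toList <+: ("GERÇEK POZİTİF".toList).drop q) := by decide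
          exact hall p hp14 h13
        by_cases hle : ("FALSE_POSITIVE".toList).length ≤ (("GERÇEK POZİTİF".toList).drop p).length
        · exact hfin.2 (prefix_append_left hpre hle)
        · exact hfin.1 (prefix_append_right hpre (by omega))
  have h := stage pvPs5 "FALSE_POSITIVE".toList "YANLIŞ POZİTİF".toList
    (fun u => ¬ "TRUE_POSITIVEALSE_POSITIVE".toList <:+: u)
    (fun u n hu hin => hu (hin.trans (List.drop_suffix n u).isInfix))
    (by decide) (by decide) hH3 (by decide) (by decide) t hn
  simpa [pvPs6] using h

theorem string_eq_of_toList {a b : String} (h : a.toList = b.toList) : a = b := by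
  rw [← String.ofList_toList (s := a), h, String.ofList_toList]

theorem A_eq_chars (text : String) : (to_tr text).toList =
    repl "FALSE_POSITIVE".toList "YANLIŞ POZİTİF".toList (scanTr pvPs5 text.toList) ++
      " [TR]".toList := by
  rw [to_tr, String.toList_append]
  simp only [pvMappings, List.foldl_cons, List.foldl_nil, PySem.Str.toList_replace]
  rw [replace_eq_repl _ ("SSH Brute Force".toList) _ (by decide)]
  rw [replace_eq_repl _ ("HIGH".toList) _ (by decide)]
  rw [replace_eq_repl _ ("MEDIUM".toList) _ (by decide)]
  rw [replace_eq_repl _ ("LOW".toList) _ (by decide)]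
  rw [replace_eq_repl _ ("TRUE_POSITIVE".toList) _ (by decide)]
  rw [replace_eq_repl _ ("FALSE_POSITIVE".toList) _ (by decide)]
  rw [st1, st2, st3, st4, st5]

theorem B_eq_chars (text : String) : (to_tr_alt text).toList =
    scanTr pvPs6 text.toList ++ " [TR]".toList := by
  rw [to_tr_alt, String.toList_ofList, show pvPairsC = pvPs6 from rfl]

theorem hasMagic_iff (t : List Char) : pvHasMagic t = true ↔ pvMagicL <:+: t := by
  induction t with
  | nil =>
    simp only [pvHasMagic, Bool.false_eq_true, false_iff, List.infix_nil]
    decide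
  | cons c s ih =>
    simp only [pvHasMagic, Bool.or_eq_true, List.isPrefixOf_iff_prefix, ih,
      List.infix_cons_iff]

-- ---------- tightness: inside the cascade region the outputs always differ ----------
theorem infix_iff_drop {l t : List Char} : l <:+: t ↔ ∃ j, l <+: t.drop j := by
  constructor
  · rintro ⟨u, w, rfl⟩
    exact ⟨u.length, by simp [List.drop_append_of_le_length, List.prefix_append]⟩
  · rintro ⟨j, hj⟩
    exact (hj.isInfix).trans (List.drop_suffix j t).isInfix

theorem infix_transfer {mag a t' : List Char}
    (hno : ∀ p, p < a.length → ¬ mag <+: (a.drop p ++ t'))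
    (hin : mag <:+: a ++ t') : mag <:+: t' := by
  obtain ⟨j, hj⟩ := infix_iff_drop.mp hin
  rw [List.drop_append] at hj
  by_cases hja : j < a.length
  · exact absurd (by simpa [Nat.sub_eq_zero_of_le hja.le] using hj) (hno j hja)
  · rw [List.drop_eq_nil_of_le (by omega), List.nil_append] at hj
    exact infix_iff_drop.mpr ⟨j - a.length, hj⟩

theorem nocross_at {k a x : List Char} (p : Nat)
    (h : ¬ (a.drop p <+: k) ∧ ¬ (k <+: a.drop p)) : ¬ k <+: (a.drop p ++ x) := by
  intro hk
  by_cases hle : k.length ≤ (a.drop p).length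
  · exact h.2 (prefix_append_left hk hle)
  · exact h.1 (prefix_append_right hk (by omega))

theorem head_ne_not_prefix {k b y : List Char} (hb : b ≠ []) (hk : k ≠ [])
    (h : k.head? ≠ b.head?) : ¬ k <+: b ++ y := by
  intro hpre
  cases k with
  | nil => exact hk rfl
  | cons kh kt =>
    cases b with
    | nil => exact hb rfl
    | cons bh bt =>
      rw [List.cons_append, List.cons_prefix_cons] at hpre
      simp [hpre.1] at h

theorem tight_chars :
    ∀ t, pvMagicL <:+: t →
      repl "FALSE_POSITIVE".toList "YANLIŞ POZİTİF".toList (scanTr pvPs5 t) ≠ scanTr pvPs6 t := by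
  have hne5 : ∀ kv ∈ pvPs5, kv.1 ≠ [] := by decide
  have hne6 : ∀ kv ∈ pvPs6, kv.1 ≠ [] := by decide
  have main : ∀ n t, t.length ≤ n → pvMagicL <:+: t →
      repl "FALSE_POSITIVE".toList "YANLIŞ POZİTİF".toList (scanTr pvPs5 t) ≠ scanTr pvPs6 t := by
    intro n
    induction n with
    | zero =>
      intro t ht hmag
      have : t = [] := by cases t <;> simp_all
      subst this
      exact absurd (by simpa [List.infix_nil] using hmag) (by decide)
    | succ n ih =>
      intro t ht hmag
      cases t with
      | nil => exact absurd (by simpa [List.infix_nil] using hmag) (by decide)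
      | cons c s =>
        cases hf : pvPs5.find? (fun kv => kv.1.isPrefixOf (c :: s)) with
        | some kv =>
          have hmem : kv ∈ pvPs5 := List.mem_of_find?_eq_some hf
          have hpre : kv.1 <+: (c :: s) := by
            have := List.find?_some hf
            simpa [List.isPrefixOf_iff_prefix] using this
          have hk1 : kv.1 ≠ [] := hne5 kv hmem
          have hdropeq : List.drop (kv.1.length - 1) s = (c :: s).drop kv.1.length := by
            cases h : kv.1 with
            | nil => exact absurd h hk1
            | cons o os => simp [h]
          have hdec : c :: s = kv.1 ++ (c :: s).drop kv.1.length := by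
            obtain ⟨r, hr⟩ := hpre
            rw [← hr, List.drop_left]
          have hfB : (pvPs5 ++ [("FALSE_POSITIVE".toList, "YANLIŞ POZİTİF".toList)]).find?
              (fun kv => kv.1.isPrefixOf (c :: s)) = some kv := by
            rw [List.find?_append, hf]; rfl
          have hA := scan_some pvPs5 hne5 c s kv hf
          have hB := scan_some (pvPs5 ++ [("FALSE_POSITIVE".toList, "YANLIŞ POZİTİF".toList)])
            (by decide) c s kv hfB
          rw [show pvPs6 = pvPs5 ++ [("FALSE_POSITIVE".toList, "YANLIŞ POZİTİF".toList)] from rfl]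
          rw [hA, hB, hdropeq]
          set rest := (c :: s).drop kv.1.length with hrest
          rw [show (pvPs5 ++ [("FALSE_POSITIVE".toList, "YANLIŞ POZİTİF".toList)]) = pvPs6 from rfl]
          have hlrest : rest.length ≤ n := by
            rw [hrest]
            simp only [List.length_drop, List.length_cons]
            simp only [List.length_cons] at ht
            have := len_pos hk1
            omega
          have hmem2 : kv = ("SSH Brute Force".toList, "SSH Kaba Kuvvet Saldırı".toList) ∨
              kv = ("HIGH".toList, "YÜKSEK".toList) ∨ kv = ("MEDIUM".toList, "ORTA".toList) ∨
              kv = ("LOW".toList, "DÜŞÜK".toList) ∨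
              kv = ("TRUE_POSITIVE".toList, "GERÇEK POZİTİF".toList) := by
            simpa [pvPs5, pvPs4, pvPs3, pvPs2, pvPs1, or_assoc] using hmem
          clear hmem
          rcases hmem2 with h' | h' | h' | h' | h'
          -- the four harmless pairs: distribute and recurse
          ·
            subst h'
            have hmag' : pvMagicL <:+: rest :=
              infix_transfer (fun p hp => nocross (by decide) rest p hp) (hdec ▸ hmag)
            rw [H3_of_nocross (by decide) _]
            intro heq
            exact ih rest hlrest hmag' (List.append_cancel_left heq)
          ·
            subst h'
            have hmag' : pvMagicL <:+: rest :=
              infix_transfer (fun p hp => nocross (by decide) rest p hp) (hdec ▸ hmag)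
            rw [H3_of_nocross (by decide) _]
            intro heq
            exact ih rest hlrest hmag' (List.append_cancel_left heq)
          ·
            subst h'
            have hmag' : pvMagicL <:+: rest :=
              infix_transfer (fun p hp => nocross (by decide) rest p hp) (hdec ▸ hmag)
            rw [H3_of_nocross (by decide) _]
            intro heq
            exact ih rest hlrest hmag' (List.append_cancel_left heq)
          ·
            subst h'
            have hmag' : pvMagicL <:+: rest :=
              infix_transfer (fun p hp => nocross (by decide) rest p hp) (hdec ▸ hmag)
            rw [H3_of_nocross (by decide) _]
            intro heq
            exact ih rest hlrest hmag' (List.append_cancel_left heq)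
          -- the cascading pair TRUE_POSITIVE → "GERÇEK POZİTİF"
          ·
            subst h'
            by_cases hpat : "ALSE_POSITIVE".toList <+: rest
            · -- cascade: the outputs differ right here, no recursion needed
              obtain ⟨w', hw⟩ := hpat
              have hsplitA : scanTr pvPs5 rest = "ALSE_POSITIVE".toList ++ scanTr pvPs5 w' := by
                rw [← hw]
                refine scan_append pvPs5 hne5 _ _ (fun p hp kv' hkv' => nocross_at p ?_)
                revert hkv'
                have hfin : ∀ kv'' ∈ pvPs5, ¬ (("ALSE_POSITIVE".toList).drop p <+: kv''.1) ∧
                    ¬ (kv''.1 <+: ("ALSE_POSITIVE".toList).drop p) := by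
                  have : ∀ q, q < 13 → ∀ kv'' ∈ pvPs5,
                      ¬ (("ALSE_POSITIVE".toList).drop q <+: kv''.1) ∧
                      ¬ (kv''.1 <+: ("ALSE_POSITIVE".toList).drop q) := by decide
                  exact this p (by simpa using hp)
                exact fun hkv' => hfin kv' hkv'
              have hsplitB : scanTr pvPs6 rest = "ALSE_POSITIVE".toList ++ scanTr pvPs6 w' := by
                rw [← hw]
                refine scan_append pvPs6 hne6 _ _ (fun p hp kv' hkv' => nocross_at p ?_)
                revert hkv'
                have hfin : ∀ kv'' ∈ pvPs6, ¬ (("ALSE_POSITIVE".toList).drop p <+: kv''.1) ∧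
                    ¬ (kv''.1 <+: ("ALSE_POSITIVE".toList).drop p) := by
                  have : ∀ q, q < 13 → ∀ kv'' ∈ pvPs6,
                      ¬ (("ALSE_POSITIVE".toList).drop q <+: kv''.1) ∧
                      ¬ (kv''.1 <+: ("ALSE_POSITIVE".toList).drop q) := by decide
                  exact this p (by simpa using hp)
                exact fun hkv' => hfin kv' hkv'
              rw [hsplitA, hsplitB]
              rw [show (("TRUE_POSITIVE".toList, "GERÇEK POZİTİF".toList).2 : List Char) =
                "GERÇEK POZİTİF".toList from rfl]
              rw [← List.append_assoc, ← List.append_assoc]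
              rw [show (("GERÇEK POZİTİF".toList ++ "ALSE_POSITIVE".toList : List Char)) =
                "GERÇEK POZİTİ".toList ++ "FALSE_POSITIVE".toList from by decide]
              rw [List.append_assoc, List.append_assoc]
              -- A side: replace walks over "GERÇEK POZİTİ", then fires on "FALSE_POSITIVE"
              rw [repl_append _ _ ("GERÇEK POZİTİ".toList) _ (fun p hp => by
                have hp13 : p < 13 := by
                  rw [show ("GERÇEK POZİTİ".toList : List Char).length = 13 from by decide] at hp
                  exact hp
                refine head_ne_not_prefix ?_ (by decide) ?_
                · intro hnil
                  have hlen := congrArg List.length hnil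
                  rw [List.length_drop,
                    show ("GERÇEK POZİTİ".toList : List Char).length = 13 from by decide] at hlen
                  simp at hlen
                  omega
                · have : ∀ q, q < 13 → (("GERÇEK POZİTİ".toList).drop q).head? ≠
                      ("FALSE_POSITIVE".toList).head? := by decide
                  exact (this p hp13).symm)]
              rw [repl_pos _ (by decide) (List.prefix_append _ _), List.drop_left]
              -- B side: "GERÇEK POZİTİF" = "GERÇEK POZİTİ" ++ ['F']
              intro heq
              have h1 := List.append_cancel_left heq
              rw [show ("YANLIŞ POZİTİF".toList : List Char) =
                'Y' :: "ANLIŞ POZİTİF".toList from by decide] at h1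
              rw [show ("FALSE_POSITIVE".toList : List Char) =
                'F' :: "ALSE_POSITIVE".toList from by decide] at h1
              simp only [List.cons_append, List.cons.injEq] at h1
              exact absurd h1.1 (by decide)
            · -- no cascade at this occurrence: distribute conditionally and recurse
              have hdist : repl "FALSE_POSITIVE".toList "YANLIŞ POZİTİF".toList
                  ("GERÇEK POZİTİF".toList ++ scanTr pvPs5 rest) =
                  "GERÇEK POZİTİF".toList ++ repl "FALSE_POSITIVE".toList "YANLIŞ POZİTİF".toList
                    (scanTr pvPs5 rest) := by
                refine repl_append _ _ _ _ (fun p hp => ?_)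
                by_cases h13 : p = 13
                · subst h13
                  rw [show ("GERÇEK POZİTİF".toList).drop 13 = ['F'] from by decide]
                  intro hpre'
                  rw [show ("FALSE_POSITIVE".toList : List Char) =
                    'F' :: "ALSE_POSITIVE".toList from by decide,
                    List.singleton_append, List.cons_prefix_cons] at hpre'
                  have := scan_preserve pvPs5 "ALSE_POSITIVE".toList (by decide) rest 0 (by decide)
                    (by simpa using hpre'.2)
                  exact hpat (by simpa using this)
                · refine nocross_at p ?_
                  have : ∀ q, q < 14 → q ≠ 13 →
                      ¬ (("GERÇEK POZİTİF".toList).drop q <+: "FALSE_POSITIVE".toList) ∧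
                      ¬ ("FALSE_POSITIVE".toList <+: ("GERÇEK POZİTİF".toList).drop q) := by decide
                  exact this p (by simpa using hp) h13
              rw [show (("TRUE_POSITIVE".toList, "GERÇEK POZİTİF".toList).2 : List Char) =
                "GERÇEK POZİTİF".toList from rfl, hdist]
              have hmag' : pvMagicL <:+: rest := by
                refine infix_transfer (fun p hp => ?_) (hdec ▸ hmag)
                by_cases h0 : p = 0
                · subst h0
                  intro hm
                  rw [show (("TRUE_POSITIVE".toList, "GERÇEK POZİTİF".toList).1 : List Char) =
                    "TRUE_POSITIVE".toList from rfl, List.drop_zero] at hm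
                  rw [show (pvMagicL : List Char) =
                    "TRUE_POSITIVE".toList ++ "ALSE_POSITIVE".toList from by decide] at hm
                  obtain ⟨r, hr⟩ := hm
                  rw [List.append_assoc] at hr
                  exact hpat ⟨r, List.append_cancel_left hr⟩
                · refine nocross_at p ?_
                  rw [show (("TRUE_POSITIVE".toList, "GERÇEK POZİTİF".toList).1 : List Char) =
                    "TRUE_POSITIVE".toList from rfl]
                  have : ∀ q, q < 13 → q ≠ 0 →
                      ¬ (("TRUE_POSITIVE".toList).drop q <+: pvMagicL) ∧
                      ¬ (pvMagicL <+: ("TRUE_POSITIVE".toList).drop q) := by decide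
                  exact this p (by simpa using hp) h0
              intro heq
              exact ih rest hlrest hmag' (List.append_cancel_left heq)
        | none =>
          by_cases hk : ("FALSE_POSITIVE".toList : List Char) <+: (c :: s)
          · -- the sixth key matches at the head
            have hdec : c :: s = "FALSE_POSITIVE".toList ++ (c :: s).drop 14 := by
              obtain ⟨r, hr⟩ := hk
              have h14 : ("FALSE_POSITIVE".toList : List Char).length = 14 := by decide
              rw [← hr, ← h14, List.drop_left]
            have hsplitA : scanTr pvPs5 (c :: s) =
                "FALSE_POSITIVE".toList ++ scanTr pvPs5 ((c :: s).drop 14) := by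
              conv_lhs => rw [hdec]
              refine scan_append pvPs5 hne5 _ _ (fun p hp kv' hkv' => nocross_at p ?_)
              revert hkv'
              have hfin : ∀ q, q < 14 → ∀ kv'' ∈ pvPs5,
                  ¬ (("FALSE_POSITIVE".toList).drop q <+: kv''.1) ∧
                  ¬ (kv''.1 <+: ("FALSE_POSITIVE".toList).drop q) := by decide
              exact fun hkv' => hfin p (by simpa using hp) kv' hkv'
            rw [hsplitA, repl_pos _ (by decide) (List.prefix_append _ _), List.drop_left]
            have hfB : (pvPs5 ++ [("FALSE_POSITIVE".toList, "YANLIŞ POZİTİF".toList)]).find?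
                (fun kv => kv.1.isPrefixOf (c :: s)) =
                some ("FALSE_POSITIVE".toList, "YANLIŞ POZİTİF".toList) := by
              rw [List.find?_append, hf, Option.none_or]
              exact List.find?_cons_of_pos (List.isPrefixOf_iff_prefix.mpr hk)
            rw [show pvPs6 = pvPs5 ++ [("FALSE_POSITIVE".toList, "YANLIŞ POZİTİF".toList)] from rfl]
            rw [scan_some _ (by decide) c s _ hfB]
            rw [show (pvPs5 ++ [("FALSE_POSITIVE".toList, "YANLIŞ POZİTİF".toList)]) = pvPs6 from rfl]
            rw [show List.drop ((("FALSE_POSITIVE".toList, "YANLIŞ POZİTİF".toList).1.length - 1)) s =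
              (c :: s).drop 14 from by
                rw [show (("FALSE_POSITIVE".toList, "YANLIŞ POZİTİF".toList).1.length - 1) = 13 from by decide]
                rfl]
            have hmag' : pvMagicL <:+: (c :: s).drop 14 := by
              refine infix_transfer (fun p hp => nocross_at p ?_) (hdec ▸ hmag)
              have hfin : ∀ q, q < 14 →
                  ¬ (("FALSE_POSITIVE".toList).drop q <+: pvMagicL) ∧
                  ¬ (pvMagicL <+: ("FALSE_POSITIVE".toList).drop q) := by decide
              exact hfin p (by simpa using hp)
            intro heq
            refine ih ((c :: s).drop 14) (by simp at ht ⊢; omega) hmag'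
              (List.append_cancel_left heq)
          · -- no key matches at the head
            rw [scan_none pvPs5 c s hf]
            have hnk : ¬ ("FALSE_POSITIVE".toList : List Char) <+: (c :: scanTr pvPs5 s) := by
              intro habs
              rw [show ("FALSE_POSITIVE".toList : List Char) =
                'F' :: "ALSE_POSITIVE".toList from by decide, List.cons_prefix_cons] at habs
              obtain ⟨hFc, htail⟩ := habs
              subst hFc
              have := scan_preserve pvPs5 "ALSE_POSITIVE".toList (by decide) s 0 (by decide)
                (by simpa using htail)
              apply hk
              rw [show ("FALSE_POSITIVE".toList : List Char) =
                'F' :: "ALSE_POSITIVE".toList from by decide, List.cons_prefix_cons]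
              exact ⟨rfl, by simpa using this⟩
            rw [repl_neg _ hnk]
            have hfB : (pvPs5 ++ [("FALSE_POSITIVE".toList, "YANLIŞ POZİTİF".toList)]).find?
                (fun kv => kv.1.isPrefixOf (c :: s)) = none := by
              rw [List.find?_append, hf, Option.none_or]
              refine List.find?_eq_none.mpr ?_
              intro kv' hkv'
              simp only [List.mem_singleton] at hkv'
              subst hkv'
              exact fun hab => hk (List.isPrefixOf_iff_prefix.mp hab)
            rw [show pvPs6 = pvPs5 ++ [("FALSE_POSITIVE".toList, "YANLIŞ POZİTİF".toList)] from rfl]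
            rw [scan_none _ c s hfB]
            rw [show (pvPs5 ++ [("FALSE_POSITIVE".toList, "YANLIŞ POZİTİF".toList)]) = pvPs6 from rfl]
            have hmag' : pvMagicL <:+: s := by
              obtain ⟨j, hj⟩ := infix_iff_drop.mp hmag
              cases j with
              | zero =>
                exfalso
                have hk5 : ("TRUE_POSITIVE".toList : List Char) <+: (c :: s) := by
                  refine List.IsPrefix.trans ?_ (by simpa using hj)
                  decide
                have hnp := List.find?_eq_none.mp hf
                  ("TRUE_POSITIVE".toList, "GERÇEK POZİTİF".toList) (by decide)
                exact hnp (by simpa [List.isPrefixOf_iff_prefix] using hk5)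
              | succ j' =>
                exact infix_iff_drop.mpr ⟨j', by simpa using hj⟩
            intro heq
            rw [List.cons.injEq] at heq
            exact ih s (by simp at ht; omega) hmag' heq.2
  intro t hmag
  exact main t.length t le_rfl hmag

-- ===== VERDICT (by name: the statement is the Claim_ definition above) =====
theorem to_tr_spec : Claim_unchanged_to_tr := by
  intro text _ hnD
  show to_tr text = to_tr_alt text
  have hn : ¬ "TRUE_POSITIVEALSE_POSITIVE".toList <:+: text.toList :=
    fun h => hnD ((hasMagic_iff text.toList).mpr h)
  apply string_eq_of_toList
  rw [A_eq_chars, B_eq_chars, st6 text.toList hn]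

theorem to_tr_changed : Claim_changed_to_tr := by
  unfold Claim_changed_to_tr; decide

theorem to_tr_tight : Claim_exact_to_tr := by
  intro text _ hD heq
  have hmag : pvMagicL <:+: text.toList := (hasMagic_iff text.toList).mp hD
  have hlist := congrArg String.toList heq
  rw [A_eq_chars, B_eq_chars] at hlist
  exact tight_chars text.toList hmag (List.append_cancel_right hlist)
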